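-- pv_equiv track=rewrite | github.com/wudaoyou/CCC_Solutions | CCC/foo/ccc2021/j4_2021.py | eval_list_s
-- ===== SOURCE A (Python) =====
-- def eval_list_s(lst, left, right, time=0):
--     if left >= right:
--         return lst, time
--     else:
--         if lst[left] == 'L':
--             return eval_list_s(lst, left + 1, right, time)
--         elif lst[right] == 'S':
--             return eval_list_s(lst, left, right - 1, time)
--         elif lst[left] == 'S':
--             lst[right], lst[left] = lst[left], lst[right]
--             return eval_list_s(lst, left + 1, right - 1, time + 1)
--         else:
--             return eval_list_s(lst, left + 1, right, time)
-- ===== SOURCE B (Python) =====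
-- def eval_list_s(lst, left, right, time=0):
--     # Closed-form pairing instead of step-by-step two-pointer recursion:
--     # ascending 'S' positions meet descending non-'S' positions; each crossing
--     # pair is swapped in place and counted.  Mutates lst in place, like A.
--     if left < right:
--         window = range(left, right + 1)
--         s_idx = [i for i in window if lst[i] == 'S']
--         t_idx = [j for j in reversed(window) if lst[j] != 'S']
--         for s, t in zip(s_idx, t_idx):
--             if s >= t:
--                 break
--             lst[s], lst[t] = lst[t], lst[s]
--             time += 1
--     return lst, time
-- ===== Notes on version B (the rewrite author's own statement) =====
-- stated objective: alternative
-- what changed: Replaces A's step-by-step two-pointer recursion by a closed-form pairing: collect the ascending 'S' positions and the descending non-'S' positions of the window once, zip them, and swap each pair in place while the source index is still left of the target.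
-- outside the precondition, e.g. on eval_list_s(['L', 'S', 'X'], -2, 2, 0): A returns (['L', 'S', 'X'], 2), B returns (['L', 'X', 'S'], 1); on eval_list_s(['L', 'L', 'L'], 0, 3, 0): A returns (['L', 'L', 'L'], 0), B raises IndexError
import Mathlib
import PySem

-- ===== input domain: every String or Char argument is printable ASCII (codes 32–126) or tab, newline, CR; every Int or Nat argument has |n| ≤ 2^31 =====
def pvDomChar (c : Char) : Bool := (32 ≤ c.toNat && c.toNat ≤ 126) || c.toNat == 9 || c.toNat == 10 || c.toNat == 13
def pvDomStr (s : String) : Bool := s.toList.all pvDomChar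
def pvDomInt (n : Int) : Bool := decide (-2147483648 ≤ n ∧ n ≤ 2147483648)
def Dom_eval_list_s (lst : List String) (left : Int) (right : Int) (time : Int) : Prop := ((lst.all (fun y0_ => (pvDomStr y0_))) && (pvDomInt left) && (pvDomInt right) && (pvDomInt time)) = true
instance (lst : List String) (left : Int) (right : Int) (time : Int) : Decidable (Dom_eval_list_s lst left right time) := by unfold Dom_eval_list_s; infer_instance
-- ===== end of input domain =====

-- B replaces A's step-by-step two-pointer recursion by a closed-form pairing (ascending 'S'
-- positions zipped with descending non-'S' positions, swapped while they cross); objective: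
-- alternative algorithm, same in-place mutation of lst, return value proved equal on Pre_.

-- ===== PORT A =====
def eval_list_s (lst : List String) (left : Int) (right : Int) (time : Int) : List String × Int :=
  if left ≥ right then (lst, time)
  else
    match PySem.List.pyGet? lst left with
    | none => (lst, time)      -- lst[left] IndexError; outside Pre_
    | some a =>
      if a = "L" then eval_list_s lst (left + 1) right time
      else
        match PySem.List.pyGet? lst right with
        | none => (lst, time)  -- lst[right] IndexError; outside Pre_
        | some b =>
          if b = "S" then eval_list_s lst left (right - 1) time
          else if a = "S" then
            -- lst[right], lst[left] = lst[left], lst[right]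
            eval_list_s (PySem.List.pySetD (PySem.List.pySetD lst right a) left b)
              (left + 1) (right - 1) (time + 1)
          else eval_list_s lst (left + 1) right time
termination_by (right - left).toNat
decreasing_by all_goals omega

-- ===== PORT B =====
-- the for-loop over zip(s_idx, t_idx) with its break
def pvAltLoop (pairs : List (Int × Int)) (lst : List String) (time : Int) : List String × Int :=
  match pairs with
  | [] => (lst, time)
  | (s, t) :: ps =>
    if s ≥ t then (lst, time)
    else
      -- lst[s], lst[t] = lst[t], lst[s]   (pyGetD's default is only reachable outside Pre_)
      pvAltLoop ps
        (PySem.List.pySetD (PySem.List.pySetD lst s (PySem.List.pyGetD lst t ""))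
          t (PySem.List.pyGetD lst s ""))
        (time + 1)

def eval_list_s_alt (lst : List String) (left : Int) (right : Int) (time : Int) : List String × Int :=
  if left < right then
    let window := PySem.List.pyRange left (right + 1) 1
    let sIdx := window.filter (fun i => PySem.List.pyGetD lst i "" == "S")
    let tIdx := window.reverse.filter (fun j => !(PySem.List.pyGetD lst j "" == "S"))
    pvAltLoop (sIdx.zip tIdx) lst time
  else (lst, time)

-- ===== PRECONDITION & SPEC =====
-- Pre_ excludes (a) out-of-range pointers (right ≥ len or left < -len), where A raises
-- IndexError except when the all-skipping left pointer reaches right before lst[right] is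
-- ever read, and (b) wrap-around windows longer than the list (right - left ≥ len), where
-- negative indexing aliases the same cell at two indices and A's result is an accident of
-- its interleaved in-place mutation.  In-range windows, including negative indices, are kept.
def Pre_eval_list_s (lst : List String) (left : Int) (right : Int) (_time : Int) : Prop :=
  left ≥ right ∨
    (-(lst.length : Int) ≤ left ∧ right < lst.length ∧ right - left < lst.length)
instance (lst : List String) (left : Int) (right : Int) (time : Int) : Decidable (Pre_eval_list_s lst left right time) := by unfold Pre_eval_list_s; infer_instance

def pvWitness_eval_list_s : List String × Int × Int × Int := (["S", "X", "L"], 0, 2, 0)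

def Spec_eval_list_s (lst : List String) (left : Int) (right : Int) (time : Int) (out : List String × Int) : Prop := out = eval_list_s_alt lst left right time
instance (lst : List String) (left : Int) (right : Int) (time : Int) (out : List String × Int) : Decidable (Spec_eval_list_s lst left right time out) := by unfold Spec_eval_list_s; infer_instance

-- ===== CLAIM (what is proved, stated in full; the proofs are below) =====
def Claim_equal_eval_list_s : Prop := ∀ (lst : List String) (left : Int) (right : Int) (time : Int), Dom_eval_list_s lst left right time → Pre_eval_list_s lst left right time → Spec_eval_list_s lst left right time (eval_list_s lst left right time)

-- ===== LEMMAS AND PROOFS =====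

-- the ascending 'S' positions and descending non-'S' positions of lst on window [l, r]
def pvS (lst : List String) (l r : Int) : List Int :=
  (PySem.List.pyRange l (r + 1) 1).filter (fun i => PySem.List.pyGetD lst i "" == "S")
def pvT (lst : List String) (l r : Int) : List Int :=
  (PySem.List.pyRange l (r + 1) 1).reverse.filter (fun j => !(PySem.List.pyGetD lst j "" == "S"))

-- Python's normalised index for -n ≤ i < n
def pvNrm (n : Nat) (i : Int) : Nat := if 0 ≤ i then i.toNat else n - (-i).toNat

theorem pvIdx_in (n : Nat) (i : Int) (h1 : -(n : Int) ≤ i) (h2 : i < n) :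
    PySem.List.pyIdx? n i = some (pvNrm n i) := by
  simp only [PySem.List.pyIdx?, pvNrm]
  split_ifs <;> rfl

theorem pvNrm_lt (n : Nat) (i : Int) (h1 : -(n : Int) ≤ i) (h2 : i < n) : pvNrm n i < n := by
  simp only [pvNrm]; split_ifs <;> omega

theorem pvNrm_inj (n : Nat) (i j : Int) (hij : i < j) (_hj : j < n) (hi : -(n : Int) ≤ i)
    (hw : j - i < n) : pvNrm n i ≠ pvNrm n j := by
  simp only [pvNrm]; split_ifs <;> omega

theorem pvGetD_in (xs : List String) (i : Int) (d : String)
    (h1 : -(xs.length : Int) ≤ i) (h2 : i < xs.length) :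
    PySem.List.pyGetD xs i d = (xs.getD (pvNrm xs.length i) d) := by
  simp [PySem.List.pyGetD, PySem.List.pyGet?, pvIdx_in xs.length i h1 h2,
    List.getD_eq_getElem?_getD]

theorem pvGet?_in (xs : List String) (i : Int)
    (h1 : -(xs.length : Int) ≤ i) (h2 : i < xs.length) :
    PySem.List.pyGet? xs i = some (PySem.List.pyGetD xs i "") := by
  simp [PySem.List.pyGetD, PySem.List.pyGet?, pvIdx_in xs.length i h1 h2,
    List.getElem?_eq_getElem (pvNrm_lt xs.length i h1 h2)]

theorem pvSetD_in (xs : List String) (i : Int) (v : String)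
    (h1 : -(xs.length : Int) ≤ i) (h2 : i < xs.length) :
    PySem.List.pySetD xs i v = xs.set (pvNrm xs.length i) v := by
  simp [PySem.List.pySetD, PySem.List.pySet?, pvIdx_in xs.length i h1 h2]

-- loop ignores a trailing extra target when every source is beyond it
theorem pvLoop_snoc_T (S : List Int) (x : Int) (h : ∀ s ∈ S, x < s) :
    ∀ (T : List Int) (lst : List String) (t : Int),
      pvAltLoop (S.zip (T ++ [x])) lst t = pvAltLoop (S.zip T) lst t := by
  induction S with
  | nil => intro T lst t; simp [pvAltLoop]
  | cons s S' ih =>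
    intro T lst t
    cases T with
    | nil =>
      have hx : x < s := h s (by simp)
      simp only [List.nil_append, List.zip_cons_cons, List.zip_nil_right, pvAltLoop]
      rw [if_pos (by omega)]
    | cons u T' =>
      simp only [List.cons_append, List.zip_cons_cons, pvAltLoop]
      split_ifs with hsu
      · rfl
      · exact ih (fun s hs => h s (by simp [hs])) T' _ _

-- loop ignores a trailing extra source when every target is before it
theorem pvLoop_snoc_S (x : Int) : ∀ (T S : List Int), (∀ u ∈ T, u < x) →
    ∀ (lst : List String) (t : Int),
      pvAltLoop ((S ++ [x]).zip T) lst t = pvAltLoop (S.zip T) lst t := by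
  intro T
  induction T with
  | nil => intro S _ lst t; simp [pvAltLoop]
  | cons u T' ih =>
    intro S h lst t
    cases S with
    | nil =>
      have hu : u < x := h u (by simp)
      simp only [List.nil_append, List.zip_cons_cons, List.zip_nil_left, pvAltLoop]
      rw [if_pos (by omega)]
    | cons s S' =>
      simp only [List.cons_append, List.zip_cons_cons, pvAltLoop]
      split_ifs with hsu
      · rfl
      · exact ih S' (fun u hu => h u (by simp [hu])) _ _

-- B's body, for every l r (window empty or one-sided when l ≥ r)
theorem pvAlt_eq_loop (lst : List String) (l r t : Int) :
    eval_list_s_alt lst l r t = pvAltLoop ((pvS lst l r).zip (pvT lst l r)) lst t := by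
  by_cases h : l < r
  · simp [eval_list_s_alt, h, pvS, pvT]
  · rw [eval_list_s_alt, if_neg h]
    by_cases he : l = r
    · subst he
      rw [pvS, pvT, PySem.List.pyRange_one_singleton]
      by_cases hp : PySem.List.pyGetD lst l "" = "S" <;>
        simp [hp, pvAltLoop]
    · rw [pvS, pvT, PySem.List.pyRange_one_eq_nil (by omega)]
      simp [pvAltLoop]

-- skipping a non-'S' cell at the left end drops the last target of the pairing
theorem pvStep_left (lst : List String) (l r t : Int) (hlt : l < r)
    (ha : PySem.List.pyGetD lst l "" ≠ "S") :
    eval_list_s_alt lst l r t = eval_list_s_alt lst (l + 1) r t := by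
  rw [pvAlt_eq_loop, pvAlt_eq_loop]
  have hS : pvS lst l r = pvS lst (l + 1) r := by
    rw [pvS, pvS, PySem.List.pyRange_one_cons (by omega : l < r + 1)]
    simp [ha]
  have hT : pvT lst l r = pvT lst (l + 1) r ++ [l] := by
    rw [pvT, pvT, PySem.List.pyRange_one_cons (by omega : l < r + 1)]
    simp [ha]
  rw [hS, hT]
  refine pvLoop_snoc_T _ _ ?_ _ _ _
  intro s hs
  have hm := (List.mem_filter.mp hs).1
  rw [PySem.List.mem_pyRange_one] at hm
  omega

-- skipping an 'S' cell at the right end drops the last source of the pairing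
theorem pvStep_right (lst : List String) (l r t : Int) (hlt : l < r)
    (hb : PySem.List.pyGetD lst r "" = "S") :
    eval_list_s_alt lst l r t = eval_list_s_alt lst l (r - 1) t := by
  have e1 : r - 1 + 1 = r := by omega
  rw [pvAlt_eq_loop, pvAlt_eq_loop]
  have hS : pvS lst l r = pvS lst l (r - 1) ++ [r] := by
    rw [pvS, pvS, e1, PySem.List.pyRange_one_succ_right (by omega : l ≤ r)]
    simp [hb]
  have hT : pvT lst l r = pvT lst l (r - 1) := by
    rw [pvT, pvT, e1, PySem.List.pyRange_one_succ_right (by omega : l ≤ r)]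
    simp [hb]
  rw [hS, hT]
  refine pvLoop_snoc_S _ _ _ ?_ _ _
  intro u hu
  have hm := List.mem_reverse.mp ((List.mem_filter.mp hu).1)
  rw [PySem.List.mem_pyRange_one] at hm
  omega

-- an 'S' at the left end facing a non-'S' at the right end is the head pair: it is swapped
theorem pvStep_swap (lst : List String) (l r t : Int)
    (hl : -(lst.length : Int) ≤ l) (hr : r < lst.length) (hlt : l < r)
    (hw : r - l < lst.length) (ha : PySem.List.pyGetD lst l "" = "S")
    (hb : PySem.List.pyGetD lst r "" ≠ "S") :
    eval_list_s_alt lst l r t =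
      eval_list_s_alt
        (PySem.List.pySetD (PySem.List.pySetD lst r (PySem.List.pyGetD lst l ""))
          l (PySem.List.pyGetD lst r ""))
        (l + 1) (r - 1) (t + 1) := by
  have hl_lt : l < lst.length := by omega
  have hr_ge : -(lst.length : Int) ≤ r := by omega
  have hne : pvNrm lst.length l ≠ pvNrm lst.length r := pvNrm_inj _ l r hlt hr hl hw
  have eA : PySem.List.pySetD (PySem.List.pySetD lst r (PySem.List.pyGetD lst l ""))
        l (PySem.List.pyGetD lst r "") =
      (lst.set (pvNrm lst.length r) (PySem.List.pyGetD lst l "")).set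
        (pvNrm lst.length l) (PySem.List.pyGetD lst r "") := by
    rw [pvSetD_in lst r _ hr_ge hr]
    rw [pvSetD_in _ l _ (by simpa using hl) (by simpa using hl_lt)]
    rw [List.length_set]
  have eB : PySem.List.pySetD (PySem.List.pySetD lst l (PySem.List.pyGetD lst r ""))
        r (PySem.List.pyGetD lst l "") =
      (lst.set (pvNrm lst.length r) (PySem.List.pyGetD lst l "")).set
        (pvNrm lst.length l) (PySem.List.pyGetD lst r "") := by
    rw [pvSetD_in lst l _ hl hl_lt]
    rw [pvSetD_in _ r _ (by simpa using hr_ge) (by simpa using hr)]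
    rw [List.length_set]
    exact List.set_comm _ _ hne
  have hg : ∀ i : Int, l < i → i < r →
      PySem.List.pyGetD
        ((lst.set (pvNrm lst.length r) (PySem.List.pyGetD lst l "")).set
          (pvNrm lst.length l) (PySem.List.pyGetD lst r "")) i "" =
      PySem.List.pyGetD lst i "" := by
    intro i h1 h2
    have hi1 : -(lst.length : Int) ≤ i := by omega
    have hi2 : i < lst.length := by omega
    have d1 : pvNrm lst.length i ≠ pvNrm lst.length l :=
      (pvNrm_inj lst.length l i h1 hi2 hl (by omega)).symm
    have d2 : pvNrm lst.length i ≠ pvNrm lst.length r :=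
      pvNrm_inj lst.length i r h2 hr hi1 (by omega)
    rw [pvGetD_in _ i "" (by simpa using hi1) (by simpa using hi2),
      pvGetD_in lst i "" hi1 hi2]
    simp only [List.length_set]
    rw [List.getD_eq_getElem?_getD, List.getD_eq_getElem?_getD,
      List.getElem?_set_ne d1.symm, List.getElem?_set_ne d2.symm]
  have hwin : PySem.List.pyRange l (r + 1) 1 =
      l :: (PySem.List.pyRange (l + 1) r 1 ++ [r]) := by
    rw [PySem.List.pyRange_one_cons (by omega : l < r + 1),
      PySem.List.pyRange_one_succ_right (by omega : l + 1 ≤ r)]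
  have e1 : r - 1 + 1 = r := by omega
  have hmidS : (PySem.List.pyRange (l + 1) r 1).filter
        (fun i => PySem.List.pyGetD
          ((lst.set (pvNrm lst.length r) (PySem.List.pyGetD lst l "")).set
            (pvNrm lst.length l) (PySem.List.pyGetD lst r "")) i "" == "S") =
      (PySem.List.pyRange (l + 1) r 1).filter
        (fun i => PySem.List.pyGetD lst i "" == "S") :=
    List.filter_congr (fun i hi => by
      have hm := PySem.List.mem_pyRange_one.mp hi
      rw [hg i (by omega) (by omega)])
  have hmidT : (PySem.List.pyRange (l + 1) r 1).reverse.filter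
        (fun j => !(PySem.List.pyGetD
          ((lst.set (pvNrm lst.length r) (PySem.List.pyGetD lst l "")).set
            (pvNrm lst.length l) (PySem.List.pyGetD lst r "")) j "" == "S")) =
      (PySem.List.pyRange (l + 1) r 1).reverse.filter
        (fun j => !(PySem.List.pyGetD lst j "" == "S")) :=
    List.filter_congr (fun j hj => by
      have hm := PySem.List.mem_pyRange_one.mp (List.mem_reverse.mp hj)
      rw [hg j (by omega) (by omega)])
  have hS : pvS lst l r = l :: (PySem.List.pyRange (l + 1) r 1).filter
      (fun i => PySem.List.pyGetD lst i "" == "S") := by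
    rw [pvS, hwin]
    simp [ha, hb]
  have hT : pvT lst l r = r :: (PySem.List.pyRange (l + 1) r 1).reverse.filter
      (fun j => !(PySem.List.pyGetD lst j "" == "S")) := by
    rw [pvT, hwin]
    simp [ha, hb]
  have hS' : pvS ((lst.set (pvNrm lst.length r) (PySem.List.pyGetD lst l "")).set
        (pvNrm lst.length l) (PySem.List.pyGetD lst r "")) (l + 1) (r - 1) =
      (PySem.List.pyRange (l + 1) r 1).filter
        (fun i => PySem.List.pyGetD lst i "" == "S") := by
    rw [pvS, e1]; exact hmidS
  have hT' : pvT ((lst.set (pvNrm lst.length r) (PySem.List.pyGetD lst l "")).set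
        (pvNrm lst.length l) (PySem.List.pyGetD lst r "")) (l + 1) (r - 1) =
      (PySem.List.pyRange (l + 1) r 1).reverse.filter
        (fun j => !(PySem.List.pyGetD lst j "" == "S")) := by
    rw [pvT, e1]; exact hmidT
  rw [pvAlt_eq_loop, pvAlt_eq_loop, eA, hS, hT, hS', hT']
  simp only [List.zip_cons_cons, pvAltLoop]
  rw [if_neg (by omega), eB]

theorem pvMain (k : Nat) : ∀ (lst : List String) (l r t : Int), (r - l).toNat ≤ k →
    (r ≤ l ∨ (-(lst.length : Int) ≤ l ∧ r < lst.length ∧ r - l < lst.length)) →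
    eval_list_s lst l r t = eval_list_s_alt lst l r t := by
  induction k with
  | zero =>
    intro lst l r t hk _
    rw [eval_list_s, if_pos (by omega), eval_list_s_alt, if_neg (by omega)]
  | succ k ih =>
    intro lst l r t hk hinv
    by_cases hge : l ≥ r
    · rw [eval_list_s, if_pos hge, eval_list_s_alt, if_neg (by omega)]
    · have hlt : l < r := by omega
      obtain ⟨hl, hr, hw⟩ : -(lst.length : Int) ≤ l ∧ r < lst.length ∧
          r - l < lst.length := by
        rcases hinv with h | h
        · omega
        · exact h
      have hl_lt : l < lst.length := by omega
      have hr_ge : -(lst.length : Int) ≤ r := by omega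
      rw [eval_list_s, if_neg hge, pvGet?_in lst l hl hl_lt,
        pvGet?_in lst r hr_ge hr]
      by_cases hLa : PySem.List.pyGetD lst l "" = "L"
      · simp only [if_pos hLa]
        rw [ih lst (l + 1) r t (by omega) (by
          by_cases h : r ≤ l + 1
          · exact Or.inl h
          · exact Or.inr ⟨by omega, hr, by omega⟩)]
        exact (pvStep_left lst l r t hlt (by rw [hLa]; decide)).symm
      · simp only [if_neg hLa]
        by_cases hSb : PySem.List.pyGetD lst r "" = "S"
        · simp only [if_pos hSb]
          rw [ih lst l (r - 1) t (by omega) (by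
            by_cases h : r - 1 ≤ l
            · exact Or.inl h
            · exact Or.inr ⟨hl, by omega, by omega⟩)]
          exact (pvStep_right lst l r t hlt hSb).symm
        · simp only [if_neg hSb]
          by_cases hSa : PySem.List.pyGetD lst l "" = "S"
          · simp only [if_pos hSa]
            have hlen : (PySem.List.pySetD (PySem.List.pySetD lst r
                (PySem.List.pyGetD lst l "")) l (PySem.List.pyGetD lst r "")).length =
                lst.length := by
              simp [PySem.List.length_pySetD]
            rw [ih _ (l + 1) (r - 1) (t + 1) (by omega) (by
              by_cases h : r - 1 ≤ l + 1
              · exact Or.inl h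
              · exact Or.inr ⟨by rw [hlen]; omega, by rw [hlen]; omega,
                  by rw [hlen]; omega⟩)]
            exact (pvStep_swap lst l r t hl hr hlt hw hSa hSb).symm
          · simp only [if_neg hSa]
            rw [ih lst (l + 1) r t (by omega) (by
              by_cases h : r ≤ l + 1
              · exact Or.inl h
              · exact Or.inr ⟨by omega, hr, by omega⟩)]
            exact (pvStep_left lst l r t hlt hSa).symm

-- ===== VERDICT (by name: the statement is the Claim_ definition above) =====
theorem eval_list_s_spec : Claim_equal_eval_list_s := by
  intro lst left right time _ hpre
  unfold Spec_eval_list_s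
  refine pvMain (right - left).toNat lst left right time le_rfl ?_
  rcases hpre with h | h
  · exact Or.inl h
  · exact Or.inr h
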